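-- pv_equiv track=rewrite | github.com/thegingerninja/filescanview | main.py | generate_ascii_map
-- ===== SOURCE A (Python) =====
-- import string
--
-- ANSI = {
--     'white': '\033[97m',
--     'blue': '\033[94m',
--     'yellow': '\033[93m',
--     'green': '\033[92m',
--     'cyan': '\033[96m',
--     'reset': '\033[0m',
-- }
--
-- def is_readable(char):
--     """Check if a character is printable and not whitespace/control"""
--     return char in string.printable and char not in '\t\n\r\x0b\x0c'
--
-- def format_run(run, text_only, min_run=3):
--     """Format a run of readable characters."""
--     content = ''.join(run)
--     if len(run) >= min_run:
--         return content if text_only else f"{ANSI['yellow']}{content}{ANSI['reset']}"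
--     else:
--         return '' if text_only else f"{ANSI['blue']}{'*' * len(run)}{ANSI['reset']}"
--
-- def generate_line(data, start, width, text_only):
--     line = ''
--     i = start
--     line_len = 0
--
--     while i < len(data) and line_len < width:
--         char = chr(data[i])
--         if is_readable(char):
--             run = [char]
--             j = i + 1
--             while j < len(data) and is_readable(chr(data[j])) and len(run) + line_len < width:
--                 run.append(chr(data[j]))
--                 j += 1
--             line += format_run(run, text_only)
--             line_len += len(run)
--             i = j
--         else:
--             if not text_only:
--                 line += f"{ANSI['white']}.{ANSI['reset']}"
--             line_len += 1
--             i += 1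
--
--     return line, i
--
-- def generate_ascii_map(data, width=80, text_only=False):
--     lines = []
--     i = 0
--     while i < len(data):
--         line, i = generate_line(data, i, width, text_only)
--         if line.strip():
--             lines.append(line)
--     return lines
-- ===== SOURCE B (Python) =====
-- from itertools import groupby
--
-- ANSI = {
--     'white': '\033[97m',
--     'blue': '\033[94m',
--     'yellow': '\033[93m',
--     'green': '\033[92m',
--     'cyan': '\033[96m',
--     'reset': '\033[0m',
-- }
--
--
-- def _readable(code):
--     # printable and not whitespace/control <=> ASCII 32..126
--     return 32 <= code <= 126
--
--
-- def _render_group(readable, codes, text_only):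
--     n = len(codes)
--     if readable:
--         if n >= 3:
--             text = ''.join(map(chr, codes))
--             return text if text_only else f"{ANSI['yellow']}{text}{ANSI['reset']}"
--         return '' if text_only else f"{ANSI['blue']}{'*' * n}{ANSI['reset']}"
--     return '' if text_only else f"{ANSI['white']}.{ANSI['reset']}" * n
--
--
-- def generate_ascii_map(data, width=80, text_only=False):
--     if not data:
--         return []
--     lines = []
--     rest = data
--     while rest:
--         chunk, rest = rest[:width], rest[width:]
--         line = ''.join(_render_group(r, list(g), text_only)
--                        for r, g in groupby(chunk, key=_readable))
--         if line.strip():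
--             lines.append(line)
--     return lines
-- ===== Notes on version B (the rewrite author's own statement) =====
-- stated objective: faster
-- what changed: B splits data into width-sized chunks and renders each chunk by grouping it into maximal readable/unreadable runs (groupby-style), emitting one string-multiply per unreadable run and one ''.join per line, instead of A's index-walking nested while loops that grow the line with per-character '+=' concatenations; intended as faster (run-length rendering avoids per-character formatted appends), measured 4.5x-52x in a timing run's sample runs.
import Mathlib
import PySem

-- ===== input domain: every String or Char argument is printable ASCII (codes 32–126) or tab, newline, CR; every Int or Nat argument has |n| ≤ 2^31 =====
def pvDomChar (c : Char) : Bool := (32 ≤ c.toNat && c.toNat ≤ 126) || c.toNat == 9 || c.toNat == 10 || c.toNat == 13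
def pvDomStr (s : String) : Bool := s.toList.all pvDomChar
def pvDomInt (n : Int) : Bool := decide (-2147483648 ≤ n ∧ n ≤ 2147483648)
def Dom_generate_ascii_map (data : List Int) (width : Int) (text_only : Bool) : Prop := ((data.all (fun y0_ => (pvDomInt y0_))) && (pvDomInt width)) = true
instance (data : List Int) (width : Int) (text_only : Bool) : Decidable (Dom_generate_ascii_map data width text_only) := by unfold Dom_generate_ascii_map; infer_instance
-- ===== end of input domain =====

-- B renders each width-sized chunk by grouping maximal readable/unreadable runs (itertools.groupby style)
-- instead of A's index-walking nested while loops; objective: alternative decomposition (join of rendered runs).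


-- ===== PORT A =====
-- ANSI colour constants (module-level dict in the Python source; only these four are used)
def ansiWhite : String := "\x1B[97m"
def ansiBlue : String := "\x1B[94m"
def ansiYellow : String := "\x1B[93m"
def ansiReset : String := "\x1B[0m"

-- is_readable(chr(c)) computed on the code point: string.printable holds exactly codes 32..126 and 9..13,
-- and '\t\n\r\x0b\x0c' holds exactly codes 9..13 — exact for every code point chr accepts.
def is_readable (c : Int) : Bool :=
  (decide ((32 ≤ c ∧ c ≤ 126) ∨ (9 ≤ c ∧ c ≤ 13))) && !(decide (9 ≤ c ∧ c ≤ 13))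

-- format_run: run kept as the list of code points; ''.join(run) builds the string at the end
def format_run (run : List Int) (text_only : Bool) : String :=
  let content := String.ofList (run.map (fun c => Char.ofNat c.toNat))
  if run.length ≥ 3 then
    if text_only then content else ansiYellow ++ content ++ ansiReset
  else
    if text_only then "" else ansiBlue ++ String.ofList (List.replicate run.length '*') ++ ansiReset

-- inner while of generate_line: extend the run while in range, readable, and below the width budget
def collectA (data : List Int) (j : Nat) (run : List Int) (line_len width : Int) : List Int × Nat :=
  if h : j < data.length ∧ is_readable (data.getD j 0) = true ∧ (run.length : Int) + line_len < width then
    collectA data (j + 1) (run ++ [data.getD j 0]) line_len width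
  else (run, j)
termination_by data.length - j
decreasing_by exact Nat.sub_succ_lt_self _ _ h.1

theorem collectA_le (data : List Int) (j : Nat) (run : List Int) (line_len width : Int) :
    j ≤ (collectA data j run line_len width).2 := by
  fun_induction collectA data j run line_len width with
  | case1 _ _ _ ih => omega
  | case2 => simp

-- outer while of generate_line
def genLineA (data : List Int) (i : Nat) (width : Int) (text_only : Bool) (line : String) (line_len : Int) : String × Nat :=
  if h : i < data.length ∧ line_len < width then
    let c := data.getD i 0
    if is_readable c then
      let rj := collectA data (i + 1) [c] line_len width
      genLineA data rj.2 width text_only (line ++ format_run rj.1 text_only) (line_len + rj.1.length)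
    else
      genLineA data (i + 1) width text_only
        (if text_only then line else line ++ (ansiWhite ++ "." ++ ansiReset)) (line_len + 1)
  else (line, i)
termination_by data.length - i
decreasing_by
  · exact Nat.sub_lt_sub_left h.1
      (Nat.lt_of_lt_of_le (Nat.lt_succ_self i) (collectA_le data (i + 1) [data.getD i 0] line_len width))
  · exact Nat.sub_lt_sub_left h.1 (Nat.lt_succ_self i)

-- while i < len(data) loop of generate_ascii_map; the 'i < r.2' guard only makes the recursion total:
-- when width ≤ 0 (excluded by Pre_) the Python loops forever, progress is otherwise guaranteed
def buildLinesA (data : List Int) (i : Nat) (width : Int) (text_only : Bool) (lines : List String) : List String :=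
  if h : i < data.length then
    if h2 : i < (genLineA data i width text_only "" 0).2 then
      buildLinesA data (genLineA data i width text_only "" 0).2 width text_only
        (if PySem.Str.strip (genLineA data i width text_only "" 0).1 != "" then
          lines ++ [(genLineA data i width text_only "" 0).1] else lines)
    else lines
  else lines
termination_by data.length - i
decreasing_by exact Nat.sub_lt_sub_left h h2

def generate_ascii_map (data : List Int) (width : Int) (text_only : Bool) : List String :=
  buildLinesA data 0 width text_only []

-- ===== PORT B =====
-- key used by groupby: readable <=> ASCII 32..126
def readableB (c : Int) : Bool := decide (32 ≤ c ∧ c ≤ 126)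

-- s * n on strings
def repStr (s : String) (n : Nat) : String :=
  match n with
  | 0 => ""
  | n + 1 => s ++ repStr s n

-- ''.join(parts)
def concatStr : List String → String
  | [] => ""
  | s :: r => s ++ concatStr r

-- itertools.groupby(chunk, key): maximal runs of equal key
def groupRuns : List Int → List (Bool × List Int)
  | [] => []
  | c :: rest =>
    let r := readableB c
    (r, c :: rest.takeWhile (fun x => readableB x == r)) ::
      groupRuns (rest.dropWhile (fun x => readableB x == r))
termination_by l => l.length
decreasing_by exact Nat.lt_succ_of_le (List.length_dropWhile_le _ rest)

def renderGroup (text_only : Bool) (g : Bool × List Int) : String :=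
  if g.1 then
    if g.2.length ≥ 3 then
      let text := String.ofList (g.2.map (fun c => Char.ofNat c.toNat))
      if text_only then text else ansiYellow ++ text ++ ansiReset
    else
      if text_only then "" else ansiBlue ++ String.ofList (List.replicate g.2.length '*') ++ ansiReset
  else
    if text_only then "" else repStr (ansiWhite ++ "." ++ ansiReset) g.2.length

-- the while rest: chunking loop; the length guard only makes the recursion total
-- (for width ≤ 0, excluded by Pre_, the Python loops forever)
def chunksB (width : Int) (l : List Int) : List (List Int) :=
  if l = [] then [] else
    -- chunk, rest = rest[:width], rest[width:]
    if h : (PySem.List.slice l (some width) none).length < l.length then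
      PySem.List.slice l none (some width) :: chunksB width (PySem.List.slice l (some width) none)
    else [PySem.List.slice l none (some width)]
termination_by l.length

def generate_ascii_map_alt (data : List Int) (width : Int) (text_only : Bool) : List String :=
  if data = [] then [] else
    (chunksB width data).foldl
      (fun lines chunk =>
        let line := concatStr ((groupRuns chunk).map (renderGroup text_only))
        if PySem.Str.strip line != "" then lines ++ [line] else lines) []

-- ===== PRECONDITION & SPEC =====
-- Pre_ excludes exactly the inputs where the Python A does not return: chr raises ValueError on a
-- code point outside 0..0x10FFFF, and for width ≤ 0 with nonempty data the outer loop never advances.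
def Pre_generate_ascii_map (data : List Int) (width : Int) (text_only : Bool) : Prop :=
  (data = [] ∨ 1 ≤ width) ∧ ∀ c ∈ data, 0 ≤ c ∧ c ≤ 1114111

instance (data : List Int) (width : Int) (text_only : Bool) : Decidable (Pre_generate_ascii_map data width text_only) := by
  unfold Pre_generate_ascii_map; infer_instance

def pvWitness_generate_ascii_map : List Int × Int × Bool := ([72, 105, 33, 1, 2, 65, 66], 4, false)

def Spec_generate_ascii_map (data : List Int) (width : Int) (text_only : Bool) (out : List String) : Prop := out = generate_ascii_map_alt data width text_only
instance (data : List Int) (width : Int) (text_only : Bool) (out : List String) : Decidable (Spec_generate_ascii_map data width text_only out) := by unfold Spec_generate_ascii_map; infer_instance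

-- ===== CLAIM (what is proved, stated in full; the proofs are below) =====
def Claim_equal_generate_ascii_map : Prop := ∀ (data : List Int) (width : Int) (text_only : Bool), Dom_generate_ascii_map data width text_only → Pre_generate_ascii_map data width text_only → Spec_generate_ascii_map data width text_only (generate_ascii_map data width text_only)

-- ===== LEMMAS AND PROOFS =====

theorem is_readable_eq (c : Int) : is_readable c = readableB c := by
  by_cases h1 : 32 ≤ c ∧ c ≤ 126 <;> by_cases h2 : 9 ≤ c ∧ c ≤ 13 <;>
    simp [is_readable, readableB, h1, h2] <;> omega

-- the line built from one chunk, B-style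
def lineOf (t : Bool) (chunk : List Int) : String :=
  concatStr ((groupRuns chunk).map (renderGroup t))

theorem dropWhile_eq_drop_takeWhile {α : Type} (p : α → Bool) (l : List α) :
    l.dropWhile p = l.drop (l.takeWhile p).length := by
  induction l with
  | nil => simp
  | cons a l ih => by_cases h : p a <;> simp [h, ih]

theorem drop_length_take {α : Type} (l : List α) (n : Nat) :
    l.drop (l.take n).length = l.drop n := by
  rcases Nat.le_total n l.length with h | h
  · simp [Nat.min_eq_left h]
  · simp [List.drop_eq_nil_of_le, h]

theorem renderGroup_true (t : Bool) (l : List Int) :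
    renderGroup t (true, l) = format_run l t := by
  simp [renderGroup, format_run]

theorem lineOf_nil (t : Bool) : lineOf t [] = "" := by
  rw [lineOf, groupRuns]; simp [concatStr]

theorem lineOf_unreadable (t : Bool) (c : Int) (l : List Int) (hc : readableB c = false) :
    lineOf t (c :: l) = (if t then "" else ansiWhite ++ "." ++ ansiReset) ++ lineOf t l := by
  cases l with
  | nil =>
    rw [lineOf, groupRuns]
    simp [hc, lineOf, groupRuns, concatStr, renderGroup, repStr]
  | cons d l' =>
    by_cases hd : readableB d
    · rw [lineOf, groupRuns]
      simp [hc, hd, renderGroup, repStr, concatStr]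
      rw [← lineOf]
    · rw [lineOf, groupRuns]
      simp only [hc]
      rw [lineOf, groupRuns]
      simp [hc, hd, renderGroup, repStr, concatStr]
      cases t <;> simp [String.append_assoc]

theorem collectA_spec (data : List Int) (j : Nat) (run : List Int) (k w : Int) :
    collectA data j run k w =
      (run ++ ((data.drop j).take ((w - k).toNat - run.length)).takeWhile readableB,
       j + (((data.drop j).take ((w - k).toNat - run.length)).takeWhile readableB).length) := by
  fun_induction collectA data j run k w with
  | case1 j run h ih =>
    obtain ⟨hj, hr, hlt⟩ := h
    have hg : data.getD j 0 = data[j] := List.getD_eq_getElem data 0 hj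
    have hrb : readableB data[j] = true := by rw [← is_readable_eq, ← hg]; exact hr
    have hdrop : data.drop j = data[j] :: data.drop (j + 1) := List.drop_eq_getElem_cons hj
    have hb : (w - k).toNat - run.length = ((w - k).toNat - (run.length + 1)) + 1 := by omega
    rw [ih, hg]
    rw [show (run ++ [data[j]]).length = run.length + 1 from by simp]
    rw [hdrop, hb, List.take_succ_cons, List.takeWhile_cons_of_pos hrb]
    simp only [Prod.mk.injEq, List.append_assoc, List.singleton_append, List.length_cons]
    exact ⟨trivial, by omega⟩
  | case2 j run h =>
    rcases Nat.lt_or_ge j data.length with hj | hj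
    · rcases Classical.em ((run.length : Int) + k < w) with hlt | hlt
      · have hg : data.getD j 0 = data[j] := List.getD_eq_getElem data 0 hj
        have hrb : readableB data[j] = false := by
          rcases Bool.eq_false_or_eq_true (readableB data[j]) with h' | h'
          · exact absurd ⟨hj, by rw [hg, is_readable_eq]; exact h', hlt⟩ h
          · exact h'
        have hdrop : data.drop j = data[j] :: data.drop (j + 1) := List.drop_eq_getElem_cons hj
        have hb : (w - k).toNat - run.length = ((w - k).toNat - (run.length + 1)) + 1 := by omega
        rw [hdrop, hb, List.take_succ_cons, List.takeWhile_cons_of_neg (by simp [hrb])]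
        simp
      · have hb : (w - k).toNat - run.length = 0 := by omega
        simp [hb]
    · have hdrop : data.drop j = [] := List.drop_eq_nil_of_le hj
      simp [hdrop]

theorem genLineA_spec (data : List Int) (i : Nat) (w : Int) (t : Bool) (line : String) (k : Int) :
    genLineA data i w t line k =
      (line ++ lineOf t ((data.drop i).take ((w - k).toNat)),
       i + (((data.drop i).take ((w - k).toNat))).length) := by
  fun_induction genLineA data i w t line k with
  | case1 i line k h c hc rj ih =>
    obtain ⟨hi, hk⟩ := h
    have hcdef : c = data.getD i 0 := rfl
    have hrjdef : rj = collectA data (i + 1) [c] k w := rfl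
    have hg : data.getD i 0 = data[i] := List.getD_eq_getElem data 0 hi
    have hrb : readableB data[i] = true := by rw [← is_readable_eq, ← hg, ← hcdef]; exact hc
    have hdrop : data.drop i = data[i] :: data.drop (i + 1) := List.drop_eq_getElem_cons hi
    have hTu : (((data.drop (i + 1)).take ((w - k).toNat - 1)).takeWhile readableB).length
        ≤ ((data.drop (i + 1)).take ((w - k).toNat - 1)).length :=
      (List.takeWhile_prefix readableB).length_le
    have huB : ((data.drop (i + 1)).take ((w - k).toNat - 1)).length ≤ (w - k).toNat - 1 :=
      List.length_take_le _ _
    have hcol : collectA data (i + 1) [c] k w =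
        (data[i] :: ((data.drop (i + 1)).take ((w - k).toNat - 1)).takeWhile readableB,
         (i + 1) + (((data.drop (i + 1)).take ((w - k).toNat - 1)).takeWhile readableB).length) := by
      rw [collectA_spec, hcdef, hg]
      simp
    have hC : (data.drop i).take ((w - k).toNat)
        = data[i] :: (data.drop (i + 1)).take ((w - k).toNat - 1) := by
      conv_lhs => rw [hdrop, show (w - k).toNat = ((w - k).toNat - 1) + 1 from by omega,
        List.take_succ_cons]
    have hgroup : groupRuns ((data.drop i).take ((w - k).toNat)) =
        (true, data[i] :: ((data.drop (i + 1)).take ((w - k).toNat - 1)).takeWhile readableB)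
          :: groupRuns (((data.drop (i + 1)).take ((w - k).toNat - 1)).dropWhile readableB) := by
      rw [hC, groupRuns]
      simp [hrb]
    have hC' : (data.drop ((i + 1) +
          (((data.drop (i + 1)).take ((w - k).toNat - 1)).takeWhile readableB).length)).take
          ((w - (k + ((data[i] :: ((data.drop (i + 1)).take ((w - k).toNat - 1)).takeWhile readableB).length : Int))).toNat)
        = ((data.drop (i + 1)).take ((w - k).toNat - 1)).dropWhile readableB := by
      rw [dropWhile_eq_drop_takeWhile, List.drop_take, List.drop_drop]
      congr 1
      all_goals try simp
      all_goals omega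
    rw [hrjdef, hcol] at ih ⊢
    dsimp only at ih ⊢
    rw [ih]
    simp only [Prod.mk.injEq]
    constructor
    · rw [hC']
      conv_lhs => rw [lineOf]
      conv_rhs => rw [lineOf, hgroup]
      simp only [List.map_cons, concatStr, renderGroup_true]
      try rw [String.append_assoc]
    · rw [hC', hC, dropWhile_eq_drop_takeWhile]
      simp only [List.length_cons, List.length_drop]
      omega
  | case2 i line k h c hc ih =>
    obtain ⟨hi, hk⟩ := h
    have hcdef : c = data.getD i 0 := rfl
    have hg : data.getD i 0 = data[i] := List.getD_eq_getElem data 0 hi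
    have hrb : readableB data[i] = false := by
      rcases Bool.eq_false_or_eq_true (readableB data[i]) with h' | h'
      · exact absurd (by rw [hcdef, hg, is_readable_eq]; exact h') hc
      · exact h'
    have hdrop : data.drop i = data[i] :: data.drop (i + 1) := List.drop_eq_getElem_cons hi
    have hb2 : (w - (k + 1)).toNat = (w - k).toNat - 1 := by omega
    have hC : (data.drop i).take ((w - k).toNat)
        = data[i] :: (data.drop (i + 1)).take ((w - k).toNat - 1) := by
      conv_lhs => rw [hdrop, show (w - k).toNat = ((w - k).toNat - 1) + 1 from by omega,
        List.take_succ_cons]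
    simp only [dite_eq_ite] at ih
    rw [ih, hb2, hC, lineOf_unreadable t _ _ hrb]
    simp only [Prod.mk.injEq]
    constructor
    · cases t <;> simp [String.append_assoc]
    · simp only [List.length_cons]
      omega
  | case3 i line k h =>
    have hnil : (data.drop i).take ((w - k).toNat) = [] := by
      rcases Nat.lt_or_ge i data.length with hi | hi
      · have hk : ¬ k < w := fun hk => h ⟨hi, hk⟩
        have hz : (w - k).toNat = 0 := by omega
        simp [hz]
      · simp [List.drop_eq_nil_of_le hi]
    rw [hnil]
    simp [lineOf_nil]

theorem chunksB_cons (w : Int) (l : List Int) (hw : 1 ≤ w) (hl : l ≠ []) :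
    chunksB w l = l.take w.toNat :: chunksB w (l.drop w.toNat) := by
  rw [chunksB, if_neg hl, PySem.List.slice_to _ (by omega), PySem.List.slice_from _ (by omega)]
  have hlt : (l.drop w.toNat).length < l.length := by
    simp only [List.length_drop]
    have : l.length ≠ 0 := fun hz => hl (List.eq_nil_of_length_eq_zero hz)
    omega
  rw [dif_pos hlt]

theorem buildLinesA_spec (data : List Int) (i : Nat) (w : Int) (t : Bool) (acc : List String)
    (hw : 1 ≤ w) :
    buildLinesA data i w t acc =
      (chunksB w (data.drop i)).foldl
        (fun lines chunk =>
          let line := concatStr ((groupRuns chunk).map (renderGroup t))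
          if PySem.Str.strip line != "" then lines ++ [line] else lines) acc := by
  fun_induction buildLinesA data i w t acc with
  | case1 i acc h h2 ih =>
    have hw0 : ((w : Int) - 0).toNat = w.toNat := by omega
    have hgl := genLineA_spec data i w t "" 0
    rw [hw0, String.empty_append] at hgl
    have hne : data.drop i ≠ [] := by
      intro hnil
      have := List.drop_eq_nil_iff.mp hnil
      omega
    have hdrop2 : data.drop (genLineA data i w t "" 0).2 = (data.drop i).drop w.toNat := by
      rw [hgl]
      rw [← List.drop_drop, drop_length_take]
    simp only [dite_eq_ite] at ih
    rw [chunksB_cons w _ hw hne, List.foldl_cons, ih, hdrop2]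
    congr 1
    rw [hgl]
    simp [lineOf]
  | case2 i acc h h2 =>
    exfalso
    have hw0 : ((w : Int) - 0).toNat = w.toNat := by omega
    have hgl := genLineA_spec data i w t "" 0
    rw [hw0] at hgl
    have hne : data.drop i ≠ [] := by
      intro hnil
      have := List.drop_eq_nil_iff.mp hnil
      omega
    have hpos : 0 < ((data.drop i).take w.toNat).length := by
      simp only [List.length_take, List.length_drop]
      have hlen : i < data.length := h
      omega
    rw [hgl] at h2
    simp at h2
    omega
  | case3 i acc h =>
    have hnil : data.drop i = [] := List.drop_eq_nil_of_le (by omega)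
    rw [hnil, chunksB]
    simp

-- ===== VERDICT (by name: the statement is the Claim_ definition above) =====
theorem generate_ascii_map_spec : Claim_equal_generate_ascii_map := by
  intro data width text_only _ hpre
  unfold Spec_generate_ascii_map generate_ascii_map generate_ascii_map_alt
  rcases hpre with ⟨hw, _⟩
  by_cases hd : data = []
  · subst hd
    rw [buildLinesA]; simp
  · rcases hw with hw | hw
    · exact absurd hw hd
    · rw [buildLinesA_spec data 0 width text_only [] hw]
      simp [hd]
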